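-- pv_equiv track=rewrite | github.com/asuramaya/chronohorn | scripts/train_polyhash.py | build_probe_schedule
-- ===== SOURCE A (Python) =====
-- def build_probe_schedule(max_steps: int) -> set[int]:
--     """Powers of 2 starting at 100, always includes max_steps."""
--     ps: set[int] = set()
--     s = 100
--     while s <= max_steps:
--         ps.add(s)
--         s = int(s * 2)
--     ps.add(max_steps)
--     return ps
-- ===== SOURCE B (Python) =====
-- def build_probe_schedule(max_steps: int) -> set[int]:
--     """Powers of 2 starting at 100, always includes max_steps."""
--     m = max_steps // 100
--     if m >= 1:
--         ps = {100 << k for k in range(m.bit_length())}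
--     else:
--         ps = set()
--     ps.add(max_steps)
--     return ps
-- ===== Notes on version B (the rewrite author's own statement) =====
-- stated objective: alternative
-- what changed: Replaces A's grow-until-overshoot doubling loop with a closed-form construction: m = max_steps // 100 and, when m >= 1, the set {100 << k for k in range(m.bit_length())}, since 100*2^k <= max_steps exactly when k < m.bit_length().
import Mathlib
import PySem

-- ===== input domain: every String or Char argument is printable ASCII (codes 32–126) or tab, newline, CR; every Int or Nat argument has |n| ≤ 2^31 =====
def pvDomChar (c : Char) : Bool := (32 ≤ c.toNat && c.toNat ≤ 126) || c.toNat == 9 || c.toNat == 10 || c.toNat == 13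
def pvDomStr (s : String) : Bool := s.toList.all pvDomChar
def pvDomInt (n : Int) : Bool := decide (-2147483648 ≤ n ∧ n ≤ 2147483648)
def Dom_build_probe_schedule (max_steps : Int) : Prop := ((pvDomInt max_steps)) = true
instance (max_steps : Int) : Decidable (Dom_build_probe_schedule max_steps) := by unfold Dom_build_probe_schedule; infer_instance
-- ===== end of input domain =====

-- B replaces A's grow-until-overshoot doubling loop by the closed-form count of powers:
-- m = max_steps // 100; the powers 100<<k for k < m.bit_length() are exactly those ≤ max_steps (objective: alternative).

-- ===== PORT A =====
-- while s <= max_steps: ps.add(s); s = s*2   — s starts at 100 and only doubles, so the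
-- added guard 100 ≤ s holds on every reachable state; it is only a termination guard.
def pvLoopA (max_steps s : Int) (ps : PySem.Set Int) : PySem.Set Int :=
  if 100 ≤ s ∧ s ≤ max_steps then pvLoopA max_steps (s * 2) (PySem.Set.add ps s) else ps
termination_by (max_steps - s + 1).toNat
decreasing_by omega

def build_probe_schedule (max_steps : Int) : List Int :=
  PySem.Set.add (pvLoopA max_steps 100 PySem.Set.empty) max_steps

-- ===== PORT B =====
def build_probe_schedule_alt (max_steps : Int) : List Int :=
  let m := PySem.Int.floordiv max_steps 100
  let ps : PySem.Set Int :=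
    if 1 ≤ m then
      PySem.Set.ofList ((List.range (PySem.Int.bitLength m)).map (fun (k : Nat) => (100 : Int) <<< k))
    else PySem.Set.empty
  PySem.Set.add ps max_steps

-- ===== PRECONDITION & SPEC =====
def Spec_build_probe_schedule (max_steps : Int) (out : List Int) : Prop := out = build_probe_schedule_alt max_steps
instance (max_steps : Int) (out : List Int) : Decidable (Spec_build_probe_schedule max_steps out) := by unfold Spec_build_probe_schedule; infer_instance

-- ===== CLAIM (what is proved, stated in full; the proofs are below) =====
def Claim_equal_build_probe_schedule : Prop := ∀ (max_steps : Int), Dom_build_probe_schedule max_steps → Spec_build_probe_schedule max_steps (build_probe_schedule max_steps)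

-- ===== LEMMAS AND PROOFS =====

-- the sequence of values A's loop adds, as a plain list
def pvPows (M s : Int) : List Int :=
  if 100 ≤ s ∧ s ≤ M then s :: pvPows M (s * 2) else []
termination_by (M - s + 1).toNat
decreasing_by omega

lemma pvLoopA_eq_foldl (M s : Int) (ps : PySem.Set Int) :
    pvLoopA M s ps = List.foldl PySem.Set.add ps (pvPows M s) := by
  induction s using pvPows.induct M generalizing ps with
  | case1 s h ih =>
    rw [pvLoopA, pvPows, if_pos h, if_pos h, List.foldl_cons, ih]
  | case2 s h =>
    rw [pvLoopA, pvPows, if_neg h, if_neg h, List.foldl_nil]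

lemma pvPows_eq (M s : Int) (hs : 100 ≤ s) :
    pvPows M s =
      if s ≤ M then
        (List.range (PySem.Int.bitLength (PySem.Int.floordiv M s))).map (fun k => s * 2 ^ k)
      else [] := by
  induction s using pvPows.induct M with
  | case1 s h ih =>
    have hs2 : (100 : Int) ≤ s * 2 := by omega
    have hm1 : 1 ≤ PySem.Int.floordiv M s := by
      rw [PySem.Int.le_floordiv_iff_mul_le (by omega)]; omega
    have hbl : PySem.Int.bitLength (PySem.Int.floordiv M s)
        = PySem.Int.bitLength (PySem.Int.floordiv (PySem.Int.floordiv M s) 2) + 1 :=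
      PySem.Int.bitLength_of_pos (by omega)
    have hdd : PySem.Int.floordiv (PySem.Int.floordiv M s) 2 = PySem.Int.floordiv M (s * 2) := by
      rw [PySem.Int.floordiv_eq_ediv_of_pos (by omega : (0:Int) < s),
          PySem.Int.floordiv_eq_ediv_of_pos (by omega : (0:Int) < 2),
          PySem.Int.floordiv_eq_ediv_of_pos (by omega : (0:Int) < s * 2)]
      exact Int.ediv_ediv_of_nonneg (y := s) (by omega)
    rw [pvPows, if_pos h, if_pos h.2, ih hs2, hbl, List.range_succ_eq_map]
    by_cases h2 : s * 2 ≤ M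
    · rw [if_pos h2, hdd]
      simp only [List.map_cons, List.map_map, pow_zero, mul_one, List.cons.injEq, true_and]
      apply List.map_congr_left
      intro k _
      simp only [Function.comp_apply]
      rw [pow_succ]
      ring
    · rw [if_neg h2]
      have hz : PySem.Int.floordiv M (s * 2) = 0 := by
        rw [PySem.Int.floordiv_eq_iff_of_pos (by omega)]; omega
      rw [← hdd] at hz
      rw [hz]
      simp [PySem.Int.bitLength_zero]
  | case2 s h =>
    rw [pvPows, if_neg h, if_neg (by omega : ¬ s ≤ M)]

lemma set_add_of_not_mem (s : PySem.Set Int) (x : Int) (h : x ∉ s) :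
    PySem.Set.add s x = s ++ [x] := by
  simp [PySem.Set.add, PySem.Set.contains, h]

lemma foldl_add_of_nodup : ∀ (l ps : List Int), (ps ++ l).Nodup →
    List.foldl PySem.Set.add ps l = ps ++ l := by
  intro l
  induction l with
  | nil => simp
  | cons x t ih =>
    intro ps h
    have hx : x ∉ ps := by
      intro hmem
      exact (List.disjoint_of_nodup_append h) hmem (List.mem_cons_self)
    rw [List.foldl_cons, set_add_of_not_mem ps x hx, ih (ps ++ [x]) (by simpa using h)]
    simp

lemma nodup_powlist (b : Nat) :
    ((List.range b).map (fun k => (100 : Int) * 2 ^ k)).Nodup := by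
  refine List.Nodup.map ?_ (List.nodup_range)
  intro a b h
  by_contra hne
  rcases Nat.lt_or_ge a b with hlt | hge
  · have := pow_lt_pow_right₀ (by norm_num : (1:Int) < 2) hlt
    nlinarith
  · have hlt : b < a := lt_of_le_of_ne hge (Ne.symm hne)
    have := pow_lt_pow_right₀ (by norm_num : (1:Int) < 2) hlt
    nlinarith

-- ===== VERDICT (by name: the statement is the Claim_ definition above) =====
theorem build_probe_schedule_spec : Claim_equal_build_probe_schedule := by
  intro M _
  unfold Spec_build_probe_schedule build_probe_schedule build_probe_schedule_alt
  rw [pvLoopA_eq_foldl, pvPows_eq M 100 (by omega)]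
  by_cases h : (100 : Int) ≤ M
  · have hm1 : 1 ≤ PySem.Int.floordiv M 100 := by
      rw [PySem.Int.le_floordiv_iff_mul_le (by omega)]; omega
    simp only [if_pos h, if_pos hm1]
    have hsh : (fun k : Nat => (100 : Int) <<< k) = fun k : Nat => (100 : Int) * 2 ^ k := by
      funext k; exact Int.shiftLeft_eq 100 k
    rw [hsh, PySem.Set.ofList_eq_foldl,
        foldl_add_of_nodup _ [] (by simpa using nodup_powlist _),
        foldl_add_of_nodup _ PySem.Set.empty (by simpa [PySem.Set.empty] using nodup_powlist _)]
    simp [PySem.Set.empty]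
  · have hm1 : ¬ (1 : Int) ≤ PySem.Int.floordiv M 100 := by
      rw [PySem.Int.le_floordiv_iff_mul_le (by omega)]; omega
    simp only [if_neg (by omega : ¬ (100 : Int) ≤ M), if_neg hm1]
    simp
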